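-- pv_equiv track=rewrite | github.com/seanson/octo-py | src/octopus.py | _version_is_between
-- ===== SOURCE A (Python) =====
-- def _version_is_between(from_version: str, check_version: str, to_version: str) -> bool:
--     """Simple version comparison - check if check_version is between from_version and to_version."""
--     # For semantic versions like 0.0.4 and 0.0.11, we need proper comparison
--     try:
--         # Split versions into parts for comparison
--         from_parts = [int(x) for x in from_version.split(".")]
--         check_parts = [int(x) for x in check_version.split(".")]
--         to_parts = [int(x) for x in to_version.split(".")]
--
--         # Pad with zeros to make them the same length
--         max_len = max(len(from_parts), len(check_parts), len(to_parts))
--         from_parts += [0] * (max_len - len(from_parts))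
--         check_parts += [0] * (max_len - len(check_parts))
--         to_parts += [0] * (max_len - len(to_parts))
--
--         # Check if check_version > from_version and check_version <= to_version
--         return from_parts < check_parts <= to_parts
--     except (ValueError, AttributeError):
--         # Fallback to string comparison if version parsing fails
--         return from_version < check_version <= to_version
-- ===== SOURCE B (Python) =====
-- def _cmp(a, b):
--     """Three-way compare of two part-lists walked in parallel, missing parts read as 0."""
--     if not a and not b:
--         return 0
--     x = a[0] if a else 0
--     y = b[0] if b else 0
--     if x < y:
--         return -1
--     if x > y:
--         return 1
--     return _cmp(a[1:], b[1:])
--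
--
-- def _version_is_between(from_version: str, check_version: str, to_version: str) -> bool:
--     """Check if check_version is between from_version and to_version."""
--     try:
--         from_parts = [int(x) for x in from_version.split(".")]
--         check_parts = [int(x) for x in check_version.split(".")]
--         to_parts = [int(x) for x in to_version.split(".")]
--     except (ValueError, AttributeError):
--         # Fallback to string comparison if version parsing fails
--         return from_version < check_version <= to_version
--     return _cmp(from_parts, check_parts) < 0 and _cmp(check_parts, to_parts) <= 0
-- ===== Notes on version B (the rewrite author's own statement) =====
-- stated objective: alternative
-- what changed: Replaces A's pad-all-three-lists-to-max-length plus built-in chained list comparison with a recursive three-way comparator that walks two part-lists in parallel, treating a missing component as 0, so no padding lists are ever built.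
import Mathlib
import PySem

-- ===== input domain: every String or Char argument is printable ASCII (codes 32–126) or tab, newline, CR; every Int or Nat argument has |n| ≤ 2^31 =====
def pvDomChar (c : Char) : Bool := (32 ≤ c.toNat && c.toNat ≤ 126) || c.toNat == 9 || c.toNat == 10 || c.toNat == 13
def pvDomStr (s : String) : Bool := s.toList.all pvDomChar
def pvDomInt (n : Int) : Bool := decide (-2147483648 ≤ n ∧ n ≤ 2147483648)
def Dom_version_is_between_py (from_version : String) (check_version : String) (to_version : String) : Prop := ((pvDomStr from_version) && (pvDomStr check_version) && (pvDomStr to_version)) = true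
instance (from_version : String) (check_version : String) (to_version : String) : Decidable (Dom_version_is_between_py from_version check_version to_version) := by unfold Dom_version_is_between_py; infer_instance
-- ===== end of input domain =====

-- B replaces A's pad-to-max-length lists + built-in chained list comparison by a recursive
-- three-way comparator walking two part-lists in parallel (missing component read as 0);
-- same cost, different decomposition ("alternative").


-- ===== PORT A =====
-- [int(x) for x in s.split(".")]; `none` exactly where int() raises ValueError
def pvParsePartsA (s : String) : Option (List Int) :=
  (PySem.Chars.splitOn s.toList ['.']).mapM PySem.Int.ofChars?

-- Python's `<` on lists of ints (lexicographic, shorter prefix is smaller)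
def pvListLt : List Int → List Int → Bool
  | [], [] => false
  | [], _ :: _ => true
  | _ :: _, [] => false
  | x :: xs, y :: ys => if x < y then true else if y < x then false else pvListLt xs ys

-- Python's `<=` on lists of ints
def pvListLe : List Int → List Int → Bool
  | [], [] => true
  | [], _ :: _ => true
  | _ :: _, [] => false
  | x :: xs, y :: ys => if x < y then true else if y < x then false else pvListLe xs ys

def version_is_between_py (from_version : String) (check_version : String) (to_version : String) : Bool :=
  match pvParsePartsA from_version, pvParsePartsA check_version, pvParsePartsA to_version with
  | some from_parts, some check_parts, some to_parts =>
    let maxLen := max from_parts.length (max check_parts.length to_parts.length)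
    let from_parts' := from_parts ++ List.replicate (maxLen - from_parts.length) (0 : Int)
    let check_parts' := check_parts ++ List.replicate (maxLen - check_parts.length) (0 : Int)
    let to_parts' := to_parts ++ List.replicate (maxLen - to_parts.length) (0 : Int)
    pvListLt from_parts' check_parts' && pvListLe check_parts' to_parts'
  | _, _, _ =>
    PySem.Chars.strLt from_version.toList check_version.toList
      && !PySem.Chars.strLt to_version.toList check_version.toList

-- ===== PORT B =====
-- [int(x) for x in s.split(".")]; `none` exactly where int() raises ValueError
def pvParsePartsB (s : String) : Option (List Int) :=
  (PySem.Chars.splitOn s.toList ['.']).mapM PySem.Int.ofChars?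

-- three-way compare walking the lists in parallel, missing parts read as 0
def pvCmp : List Int → List Int → Int
  | [], [] => 0
  | x :: xs, [] => if x < 0 then -1 else if x > 0 then 1 else pvCmp xs []
  | [], y :: ys => if (0 : Int) < y then -1 else if (0 : Int) > y then 1 else pvCmp [] ys
  | x :: xs, y :: ys => if x < y then -1 else if x > y then 1 else pvCmp xs ys

def version_is_between_py_alt (from_version : String) (check_version : String) (to_version : String) : Bool :=
  -- the try block parses the three versions in sequence; the first failure falls back
  match pvParsePartsB from_version with
  | none =>
    PySem.Chars.strLt from_version.toList check_version.toList
      && !PySem.Chars.strLt to_version.toList check_version.toList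
  | some from_parts =>
    match pvParsePartsB check_version with
    | none =>
      PySem.Chars.strLt from_version.toList check_version.toList
        && !PySem.Chars.strLt to_version.toList check_version.toList
    | some check_parts =>
      match pvParsePartsB to_version with
      | none =>
        PySem.Chars.strLt from_version.toList check_version.toList
          && !PySem.Chars.strLt to_version.toList check_version.toList
      | some to_parts =>
        decide (pvCmp from_parts check_parts < 0) && decide (pvCmp check_parts to_parts ≤ 0)

-- ===== PRECONDITION & SPEC =====
def Spec_version_is_between_py (from_version : String) (check_version : String) (to_version : String) (out : Bool) : Prop := out = version_is_between_py_alt from_version check_version to_version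
instance (from_version : String) (check_version : String) (to_version : String) (out : Bool) : Decidable (Spec_version_is_between_py from_version check_version to_version out) := by unfold Spec_version_is_between_py; infer_instance

-- ===== CLAIM (what is proved, stated in full; the proofs are below) =====
def Claim_equal_version_is_between_py : Prop := ∀ (from_version : String) (check_version : String) (to_version : String), Dom_version_is_between_py from_version check_version to_version → Spec_version_is_between_py from_version check_version to_version (version_is_between_py from_version check_version to_version)

-- ===== LEMMAS AND PROOFS =====

lemma pad_lt : ∀ (n : Nat) (a b : List Int), a.length ≤ n → b.length ≤ n →
    pvListLt (a ++ List.replicate (n - a.length) 0) (b ++ List.replicate (n - b.length) 0)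
      = decide (pvCmp a b < 0) := by
  intro n
  induction n with
  | zero =>
    intro a b ha hb
    match a, b with
    | [], [] => simp [pvListLt, pvCmp]
    | x :: xs, _ => simp at ha
    | [], y :: ys => simp at hb
  | succ n ih =>
    intro a b ha hb
    match a, b with
    | [], [] =>
      have h := ih [] [] (by simp) (by simp)
      simpa [List.replicate_succ, pvListLt] using h
    | [], y :: ys =>
      have h := ih [] ys (by simp) (by simpa using Nat.lt_succ_iff.mp (Nat.lt_of_lt_of_le (by simp) hb))
      simp only [List.length_nil, Nat.sub_zero, List.length_cons, Nat.succ_sub_succ,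
        List.replicate_succ, List.nil_append, List.cons_append]
      rcases lt_trichotomy (0 : Int) y with hy | hy | hy
      · simp [pvListLt, pvCmp, hy]
      · subst hy
        simpa [pvListLt, pvCmp] using h
      · simp [pvListLt, pvCmp, hy, not_lt.mpr (le_of_lt hy)]
    | x :: xs, [] =>
      have h := ih xs [] (by simpa using Nat.lt_succ_iff.mp (Nat.lt_of_lt_of_le (by simp) ha)) (by simp)
      simp only [List.length_nil, Nat.sub_zero, List.length_cons, Nat.succ_sub_succ,
        List.replicate_succ, List.nil_append, List.cons_append]
      rcases lt_trichotomy x (0 : Int) with hx | hx | hx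
      · simp [pvListLt, pvCmp, hx]
      · subst hx
        simpa [pvListLt, pvCmp] using h
      · simp [pvListLt, pvCmp, hx, not_lt.mpr (le_of_lt hx)]
    | x :: xs, y :: ys =>
      have h := ih xs ys (by simpa using Nat.lt_succ_iff.mp (Nat.lt_of_lt_of_le (by simp) ha))
        (by simpa using Nat.lt_succ_iff.mp (Nat.lt_of_lt_of_le (by simp) hb))
      simp only [List.length_cons, Nat.succ_sub_succ, List.cons_append]
      rcases lt_trichotomy x y with hxy | hxy | hxy
      · simp [pvListLt, pvCmp, hxy]
      · subst hxy
        simpa [pvListLt, pvCmp] using h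
      · simp [pvListLt, pvCmp, hxy, not_lt.mpr (le_of_lt hxy)]

lemma pad_le : ∀ (n : Nat) (a b : List Int), a.length ≤ n → b.length ≤ n →
    pvListLe (a ++ List.replicate (n - a.length) 0) (b ++ List.replicate (n - b.length) 0)
      = decide (pvCmp a b ≤ 0) := by
  intro n
  induction n with
  | zero =>
    intro a b ha hb
    match a, b with
    | [], [] => simp [pvListLe, pvCmp]
    | x :: xs, _ => simp at ha
    | [], y :: ys => simp at hb
  | succ n ih =>
    intro a b ha hb
    match a, b with
    | [], [] =>
      have h := ih [] [] (by simp) (by simp)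
      simpa [List.replicate_succ, pvListLe] using h
    | [], y :: ys =>
      have h := ih [] ys (by simp) (by simpa using Nat.lt_succ_iff.mp (Nat.lt_of_lt_of_le (by simp) hb))
      simp only [List.length_nil, Nat.sub_zero, List.length_cons, Nat.succ_sub_succ,
        List.replicate_succ, List.nil_append, List.cons_append]
      rcases lt_trichotomy (0 : Int) y with hy | hy | hy
      · simp [pvListLe, pvCmp, hy]
      · subst hy
        simpa [pvListLe, pvCmp] using h
      · simp [pvListLe, pvCmp, hy, not_lt.mpr (le_of_lt hy), not_le.mpr]
    | x :: xs, [] =>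
      have h := ih xs [] (by simpa using Nat.lt_succ_iff.mp (Nat.lt_of_lt_of_le (by simp) ha)) (by simp)
      simp only [List.length_nil, Nat.sub_zero, List.length_cons, Nat.succ_sub_succ,
        List.replicate_succ, List.nil_append, List.cons_append]
      rcases lt_trichotomy x (0 : Int) with hx | hx | hx
      · simp [pvListLe, pvCmp, hx]
      · subst hx
        simpa [pvListLe, pvCmp] using h
      · simp [pvListLe, pvCmp, hx, not_lt.mpr (le_of_lt hx), not_le.mpr]
    | x :: xs, y :: ys =>
      have h := ih xs ys (by simpa using Nat.lt_succ_iff.mp (Nat.lt_of_lt_of_le (by simp) ha))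
        (by simpa using Nat.lt_succ_iff.mp (Nat.lt_of_lt_of_le (by simp) hb))
      simp only [List.length_cons, Nat.succ_sub_succ, List.cons_append]
      rcases lt_trichotomy x y with hxy | hxy | hxy
      · simp [pvListLe, pvCmp, hxy]
      · subst hxy
        simpa [pvListLe, pvCmp] using h
      · simp [pvListLe, pvCmp, hxy, not_lt.mpr (le_of_lt hxy), not_le.mpr]

-- ===== VERDICT (by name: the statement is the Claim_ definition above) =====
theorem version_is_between_py_spec : Claim_equal_version_is_between_py := by
  intro f c t _
  unfold Spec_version_is_between_py version_is_between_py version_is_between_py_alt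
  have hp : pvParsePartsA = pvParsePartsB := rfl
  rw [hp]
  rcases pvParsePartsB f with _ | fp <;> rcases pvParsePartsB c with _ | cp <;>
    rcases pvParsePartsB t with _ | tp <;> try rfl
  simp only []
  rw [pad_lt (max fp.length (max cp.length tp.length)) fp cp
        (Nat.le_max_left _ _) (le_trans (Nat.le_max_left _ _) (Nat.le_max_right _ _)),
      pad_le (max fp.length (max cp.length tp.length)) cp tp
        (le_trans (Nat.le_max_left _ _) (Nat.le_max_right _ _))
        (le_trans (Nat.le_max_right _ _) (Nat.le_max_right _ _))]
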